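-- pv_equiv track=rewrite | github.com/serejek2004/AlgoLabs | src/files/finite_automaton.py | get_next_position
-- ===== SOURCE A (Python) =====
-- def get_next_position(needle, automatic_position, char):
--     if automatic_position < len(needle) and char == needle[automatic_position]:
--         return automatic_position + 1
--     else:
--         for next_position in range(automatic_position, 0, -1):
--             prefix_match = needle[next_position - 1] == char
--             suffix_match = needle[:next_position - 1] == needle[(automatic_position - next_position + 1):automatic_position]
--
--             if prefix_match and suffix_match:
--                 return next_position
--         return 0
-- ===== SOURCE B (Python) =====
-- def _prefix_function(needle):
--     pi = [0] * len(needle)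
--     k = 0
--     for i in range(1, len(needle)):
--         while k > 0 and needle[i] != needle[k]:
--             k = pi[k - 1]
--         if needle[i] == needle[k]:
--             k += 1
--         pi[i] = k
--     return pi
--
--
-- def get_next_position(needle, automatic_position, char):
--     pi = _prefix_function(needle)
--     k = automatic_position
--     while k > 0 and (k == len(needle) or needle[k] != char):
--         k = pi[k - 1]
--     if k < len(needle) and char == needle[k]:
--         return k + 1
--     return 0
-- ===== Notes on version B (the rewrite author's own statement) =====
-- stated objective: faster
-- what changed: A's descending brute-force scan that re-compares needle prefixes/suffixes by slicing for every candidate is replaced by the KMP failure function: B builds the prefix-function table once and follows failure links to find the transition, with no slice comparisons at all.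
import Mathlib
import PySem

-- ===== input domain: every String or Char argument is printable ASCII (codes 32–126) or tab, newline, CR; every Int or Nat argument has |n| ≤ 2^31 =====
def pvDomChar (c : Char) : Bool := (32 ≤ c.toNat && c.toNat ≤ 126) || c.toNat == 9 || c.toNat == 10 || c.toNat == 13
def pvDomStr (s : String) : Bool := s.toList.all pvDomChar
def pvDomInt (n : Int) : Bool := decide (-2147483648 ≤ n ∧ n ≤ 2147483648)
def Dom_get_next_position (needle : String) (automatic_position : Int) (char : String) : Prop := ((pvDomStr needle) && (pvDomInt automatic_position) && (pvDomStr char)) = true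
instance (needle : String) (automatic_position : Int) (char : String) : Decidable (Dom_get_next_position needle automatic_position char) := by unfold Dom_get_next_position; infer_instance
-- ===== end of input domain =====

-- B replaces A's brute-force scan over candidate lengths (a slice comparison per candidate)
-- by the KMP prefix-function table and failure-link chasing (objective: faster).

-- ===== PORT A =====
-- `char == needle[i]` (Python string equality; pyGet? none = IndexError, excluded by Pre_)
def pvA_charEq (s : List Char) (cl : List Char) (i : Int) : Bool :=
  match PySem.List.pyGet? s i with
  | some c => cl == [c]
  | none => false

-- A's loop body: prefix_match and suffix_match
def pvA_cond (s : List Char) (p : Int) (cl : List Char) (k : Int) : Bool :=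
  pvA_charEq s cl (k - 1) &&
    (PySem.List.slice s none (some (k - 1)) ==
     PySem.List.slice s (some (p - k + 1)) (some p))

def get_next_position (needle : String) (automatic_position : Int) (char : String) : Int :=
  let s := needle.toList
  if decide (automatic_position < (s.length : Int)) && pvA_charEq s char.toList automatic_position then
    automatic_position + 1
  else
    match (PySem.List.pyRange automatic_position 0 (-1)).find? (pvA_cond s automatic_position char.toList) with
    | some k => k
    | none => 0

-- ===== PORT B =====
-- `char == needle[k]` at a Nat index
def pvCharEqN (s : List Char) (cl : List Char) (k : Nat) : Bool :=
  match s[k]? with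
  | some ch => cl == [ch]
  | none => false

-- failure-link chase, the shared shape of B's two loops: `while k > 0 and not q(k): k = pi[k-1]`
-- (the dite `if h : k' < k` only makes the recursion visibly terminating; the prefix
-- function always satisfies pi[k-1] < k, so the `else 0` branch is never taken)
def pvChase (pi : List Nat) (q : Nat → Bool) (k : Nat) : Nat :=
  if k = 0 then 0
  else if q k then k
  else
    let k' := pi.getD (k - 1) 0
    if h : k' < k then pvChase pi q k' else 0
termination_by k
decreasing_by exact h

-- one step of _prefix_function's for-loop:
-- while k > 0 and s[i] != s[k]: k = pi[k-1];  if s[i] == s[k]: k += 1;  pi[i] = k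
def pvPiStep (s : List Char) (st : List Nat × Nat) (i : Nat) : List Nat × Nat :=
  let k1 := pvChase st.1 (fun k => s[i]? == s[k]?) st.2
  let k2 := if s[i]? == s[k1]? then k1 + 1 else k1
  (st.1.set i k2, k2)

-- pi = [0]*len(s); k = 0; for i in range(1, len(s)): …
def pvPrefixFn (s : List Char) : List Nat :=
  ((List.range' 1 (s.length - 1)).foldl (pvPiStep s) (List.replicate s.length 0, 0)).1

def get_next_position_alt (needle : String) (automatic_position : Int) (char : String) : Int :=
  let s := needle.toList
  let pi := pvPrefixFn s
  -- while k > 0 and (k == len(needle) or needle[k] != char): k = pi[k-1]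
  -- (the loop only runs for k > 0; for k ≤ 0 it leaves k unchanged)
  let k : Int :=
    if 0 < automatic_position then
      (pvChase pi (fun k => !(k == s.length) && pvCharEqN s char.toList k) automatic_position.toNat : Int)
    else automatic_position
  -- if k < len(needle) and char == needle[k]: return k + 1;  return 0
  if decide (k < (s.length : Int)) && pvA_charEq s char.toList k then k + 1 else 0

-- ===== PRECONDITION & SPEC =====
-- Pre_ excludes exactly the inputs where the Python A raises IndexError: |automatic_position| > len(needle)
-- (B raises there too).
def Pre_get_next_position (needle : String) (automatic_position : Int) (char : String) : Prop :=
  -(needle.toList.length : Int) ≤ automatic_position ∧ automatic_position ≤ (needle.toList.length : Int)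
instance (needle : String) (automatic_position : Int) (char : String) : Decidable (Pre_get_next_position needle automatic_position char) := by unfold Pre_get_next_position; infer_instance

def pvWitness_get_next_position : String × Int × String := ("aba", 2, "b")

def Spec_get_next_position (needle : String) (automatic_position : Int) (char : String) (out : Int) : Prop := out = get_next_position_alt needle automatic_position char
instance (needle : String) (automatic_position : Int) (char : String) (out : Int) : Decidable (Spec_get_next_position needle automatic_position char out) := by unfold Spec_get_next_position; infer_instance

-- ===== CLAIM =====
def Claim_equal_get_next_position : Prop := ∀ (needle : String) (automatic_position : Int) (char : String), Dom_get_next_position needle automatic_position char → Pre_get_next_position needle automatic_position char → Spec_get_next_position needle automatic_position char (get_next_position needle automatic_position char)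

-- ===== LEMMAS AND PROOFS =====

-- `s.take j` is a suffix of `s.take k` (j ≤ k): the candidate/border relation
def pvSfx (s : List Char) (j k : Nat) : Prop := j ≤ k ∧ s.take j <:+ s.take k

theorem pvSfx_zero (s : List Char) (k : Nat) : pvSfx s 0 k :=
  ⟨Nat.zero_le _, by simp⟩

theorem pvSfx_refl (s : List Char) (k : Nat) : pvSfx s k k :=
  ⟨le_rfl, List.suffix_refl _⟩

theorem pvSfx_trans {s : List Char} {i j k : Nat} (h1 : pvSfx s i j) (h2 : pvSfx s j k) :
    pvSfx s i k :=
  ⟨le_trans h1.1 h2.1, h1.2.trans h2.2⟩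

theorem pvSfx_of_le {s : List Char} {j k l : Nat} (hj : pvSfx s j l) (hk : pvSfx s k l)
    (hjk : j ≤ k) : pvSfx s j k := by
  rcases List.suffix_or_suffix_of_suffix hj.2 hk.2 with h | h
  · exact ⟨hjk, h⟩
  · have hlen : (s.take k).length = (s.take j).length := by
      have := h.length_le
      simp only [List.length_take] at *
      omega
    exact ⟨hjk, (h.eq_of_length hlen) ▸ List.suffix_refl _⟩

theorem pv_suffix_concat {u v : List Char} {a b : Char} :
    u ++ [a] <:+ v ++ [b] ↔ u <:+ v ∧ a = b := by
  constructor
  · rintro ⟨w, hw⟩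
    rw [← List.append_assoc] at hw
    obtain ⟨h1, h2⟩ := List.append_inj' hw rfl
    exact ⟨⟨w, h1⟩, by simpa using h2⟩
  · rintro ⟨⟨w, hw⟩, rfl⟩
    exact ⟨w, by rw [← List.append_assoc, hw]⟩

theorem pvSfx_succ_iff {s : List Char} {j k : Nat} (hjk : j ≤ k) (hk : k < s.length) :
    pvSfx s (j + 1) (k + 1) ↔ pvSfx s j k ∧ s[j]? = s[k]? := by
  have hj : j < s.length := lt_of_le_of_lt hjk hk
  have ej : s.take (j + 1) = s.take j ++ [s[j]] := by
    rw [List.take_add_one, List.getElem?_eq_getElem hj]; rfl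
  have ek : s.take (k + 1) = s.take k ++ [s[k]] := by
    rw [List.take_add_one, List.getElem?_eq_getElem hk]; rfl
  unfold pvSfx
  rw [ej, ek, pv_suffix_concat, List.getElem?_eq_getElem hj, List.getElem?_eq_getElem hk]
  constructor
  · rintro ⟨_, h1, h2⟩; exact ⟨⟨hjk, h1⟩, by rw [h2]⟩
  · rintro ⟨⟨_, h1⟩, h2⟩; exact ⟨by omega, h1, by injection h2⟩

theorem pvSfx_iff_drop {s : List Char} {j p : Nat} (hj : j ≤ p) (hp : p ≤ s.length) :
    (s.take j = (s.take p).drop (p - j)) ↔ pvSfx s j p := by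
  constructor
  · intro h
    exact ⟨hj, h ▸ List.drop_suffix _ _⟩
  · intro h
    have := List.suffix_iff_eq_drop.mp h.2
    simp only [List.length_take] at this
    have e : min p s.length - min j s.length = p - j := by omega
    rw [e] at this
    exact this

-- pi.getD i 0 is the length of the longest proper border of s.take (i+1)
def pvGB (s : List Char) (pi : List Nat) (i : Nat) : Prop :=
  pi.getD i 0 ≤ i ∧ pvSfx s (pi.getD i 0) (i + 1) ∧
    ∀ j, j ≤ i → pvSfx s j (i + 1) → j ≤ pi.getD i 0

-- the chase finds the greatest j in the border chain of k0 with q j (0 if none)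
theorem pvChase_spec (pi : List Nat) (q : Nat → Bool) (s : List Char) (k0 : Nat)
    (hk0 : k0 ≤ s.length) (hpi : ∀ i, i < k0 → pvGB s pi i) :
    pvChase pi q k0 ≤ k0 ∧ pvSfx s (pvChase pi q k0) k0 ∧
      (q (pvChase pi q k0) = true ∨ pvChase pi q k0 = 0) ∧
      ∀ j, pvSfx s j k0 → q j = true → j ≤ pvChase pi q k0 ∧ q (pvChase pi q k0) = true := by
  induction k0 using Nat.strong_induction_on with
  | _ k0 ih =>
    rw [pvChase]
    by_cases h0 : k0 = 0
    · subst h0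
      rw [if_pos rfl]
      refine ⟨le_rfl, pvSfx_refl s 0, Or.inr rfl, ?_⟩
      intro j hj hq
      have : j = 0 := Nat.le_zero.mp hj.1
      subst this
      exact ⟨le_rfl, hq⟩
    · rw [if_neg h0]
      by_cases hq0 : q k0 = true
      · rw [if_pos hq0]
        exact ⟨le_rfl, pvSfx_refl s k0, Or.inl hq0, fun j hj _ => ⟨hj.1, hq0⟩⟩
      · rw [if_neg hq0]
        have hgb := hpi (k0 - 1) (by omega)
        obtain ⟨hle, hsfx, hmax⟩ := hgb
        have hsfx' : pvSfx s (pi.getD (k0 - 1) 0) k0 := by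
          have e : k0 - 1 + 1 = k0 := by omega
          rw [e] at hsfx; exact hsfx
        have hlt : pi.getD (k0 - 1) 0 < k0 := by omega
        rw [dif_pos hlt]
        obtain ⟨ih1, ih2, ih3, ih4⟩ := ih (pi.getD (k0 - 1) 0) hlt
          (le_trans (le_of_lt hlt) hk0) (fun i hi => hpi i (lt_trans hi hlt))
        refine ⟨le_trans ih1 (le_of_lt hlt), pvSfx_trans ih2 hsfx', ih3, ?_⟩
        intro j hj hqj
        have hjne : j ≠ k0 := by
          intro h; rw [h] at hqj; exact hq0 hqj
        have hjlt : j ≤ k0 - 1 := by have := hj.1; omega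
        have hjk' : j ≤ pi.getD (k0 - 1) 0 := by
          apply hmax j hjlt
          have e : k0 - 1 + 1 = k0 := by omega
          rw [e]; exact hj
        exact ih4 j (pvSfx_of_le hj hsfx' hjk') hqj

-- invariant of the prefix-function fold
def pvInv (s : List Char) (c : Nat) (st : List Nat × Nat) : Prop :=
  st.1.length = s.length ∧ st.2 = st.1.getD c 0 ∧ ∀ i, i ≤ c → pvGB s st.1 i

theorem pvPiStep_inv {s : List Char} {c : Nat} {st : List Nat × Nat}
    (h : pvInv s c st) (hc : c + 1 < s.length) : pvInv s (c + 1) (pvPiStep s st (c + 1)) := by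
  obtain ⟨hlen, hk, hgb⟩ := h
  obtain ⟨hk0le, hk0sfx, hk0max⟩ := hgb c le_rfl
  set i := c + 1 with hi
  set q : Nat → Bool := fun k => s[i]? == s[k]? with hqdef
  set k0 := st.2 with hk0def
  have hk0c : k0 ≤ c := hk ▸ hk0le
  obtain ⟨sp1, sp2, sp3, sp4⟩ := pvChase_spec st.1 q s k0
    (le_trans hk0c (by omega)) (fun j hj => hgb j (le_trans (le_of_lt hj) hk0c))
  set r := pvChase st.1 q k0 with hrdef
  have hrc : r ≤ c := le_trans sp1 hk0c
  have hsfx_k0_i : pvSfx s k0 i := hk ▸ hk0sfx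
  have hsfx_r_i : pvSfx s r i := pvSfx_trans (hk ▸ sp2) hsfx_k0_i
  set k2 := if s[i]? == s[r]? then r + 1 else r with hk2def
  have hk2le : k2 ≤ i := by
    rw [hk2def]; split <;> omega
  have hgbnew : pvGB s (st.1.set i k2) i := by
    have hgetd : (st.1.set i k2).getD i 0 = k2 := by
      simp [List.getD, List.getElem?_set_self (by omega : i < st.1.length)]
    refine ⟨by rw [hgetd]; exact hk2le, ?_, ?_⟩
    · rw [hgetd]
      by_cases hm : s[i]? == s[r]?
      · rw [hk2def, if_pos hm]
        have := (pvSfx_succ_iff (by omega : r ≤ i) hc).mpr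
          ⟨hsfx_r_i, by
            have := beq_iff_eq.mp hm; exact this.symm⟩
        exact this
      · rw [hk2def, if_neg hm]
        have hr0 : r = 0 := by
          rcases sp3 with h | h
          · exact absurd (by rw [hqdef] at h; exact h) (by simpa using hm)
          · exact h
        rw [hr0]
        exact pvSfx_zero s (i + 1)
    · intro j hj hsfxj
      rw [hgetd]
      match j with
      | 0 => omega
      | j' + 1 =>
        obtain ⟨hs1, hs2⟩ := (pvSfx_succ_iff (by omega : j' ≤ i) hc).mp hsfxj
        have hj'c : j' ≤ c := by omega
        have hj'k0 : j' ≤ k0 := by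
          rw [hk]; exact hk0max j' hj'c hs1
        have hq : q j' = true := by
          rw [hqdef]; exact beq_iff_eq.mpr hs2.symm
        obtain ⟨hjr, hqr⟩ := sp4 j' (pvSfx_of_le hs1 hsfx_k0_i hj'k0) hq
        have : k2 = r + 1 := by
          rw [hk2def, if_pos (by rw [hqdef] at hqr; exact hqr)]
        omega
  have hstep : pvPiStep s st i = (st.1.set i k2, k2) := rfl
  rw [hstep]
  refine ⟨by simp [hlen], ?_, ?_⟩
  · show k2 = (st.1.set i k2).getD i 0
    simp [List.getD, List.getElem?_set_self (by omega : i < st.1.length)]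
  · intro j hj
    rcases Nat.lt_or_ge j i with hji | hji
    · have hold := hgb j (by omega)
      have hne : i ≠ j := by omega
      have hsame : (st.1.set i k2).getD j 0 = st.1.getD j 0 := by
        simp [List.getD, List.getElem?_set_ne hne]
      unfold pvGB at hold ⊢
      rw [hsame]
      exact hold
    · have : j = i := by omega
      subst this
      exact hgbnew

theorem pv_getD_replicate (n i : Nat) : (List.replicate n (0 : Nat)).getD i 0 = 0 := by
  simp only [List.getD, List.getElem?_replicate]
  split <;> rfl

theorem pvPiFold_inv (s : List Char) (h0 : 0 < s.length) :
    ∀ n, n ≤ s.length - 1 →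
      pvInv s n ((List.range' 1 n).foldl (pvPiStep s) (List.replicate s.length 0, 0)) := by
  intro n
  induction n with
  | zero =>
    intro _
    simp only [List.range'_zero, List.foldl_nil]
    refine ⟨by simp, by rw [pv_getD_replicate], ?_⟩
    intro i hi
    have : i = 0 := Nat.le_zero.mp hi
    subst this
    refine ⟨by rw [pv_getD_replicate], ?_, ?_⟩
    · rw [pv_getD_replicate]; exact pvSfx_zero s 1
    · intro j hj _
      rw [pv_getD_replicate]; omega
  | succ n ihn =>
    intro hn
    rw [List.range'_concat]
    rw [List.foldl_append]
    simp only [List.foldl_cons, List.foldl_nil]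
    have e : 1 + 1 * n = n + 1 := by omega
    rw [e]
    exact pvPiStep_inv (ihn (by omega)) (by omega)

theorem pvPrefixFn_ok (s : List Char) : ∀ i, i < s.length → pvGB s (pvPrefixFn s) i := by
  intro i hi
  have h0 : 0 < s.length := by omega
  have := pvPiFold_inv s h0 (s.length - 1) le_rfl
  exact this.2.2 i (by omega)

-- bridges between Int-indexed Python tests and Nat-indexed facts
theorem pv_charEq_nat (s cl : List Char) (j : Nat) :
    pvA_charEq s cl (j : Int) = pvCharEqN s cl j := by
  unfold pvA_charEq pvCharEqN
  rw [PySem.List.pyGet?_natCast]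


-- A's loop condition at k = j+1 says: s.take j is a suffix of s.take pn and s[j] == char
theorem pv_cond_bridge (s cl : List Char) (pn j : Nat) (hpm : pn ≤ s.length)
    (hjp : j ≤ pn) (_hjm : j < s.length) :
    pvA_cond s (pn : Int) cl ((j : Int) + 1) = true ↔
      pvSfx s j pn ∧ pvCharEqN s cl j = true := by
  unfold pvA_cond
  have e0 : ((j : Int) + 1 - 1) = (j : Int) := by ring
  rw [e0, pv_charEq_nat]
  have e1 : PySem.List.slice s none (some (j : Int)) = s.take j := by
    rw [PySem.List.slice_to s (by omega), Int.toNat_natCast]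
  have e2 : PySem.List.slice s (some ((pn : Int) - ((j : Int) + 1) + 1)) (some (pn : Int)) =
      (s.take pn).drop (pn - j) := by
    have ea : ((pn : Int) - ((j : Int) + 1) + 1) = ((pn - j : Nat) : Int) := by omega
    rw [ea, PySem.List.slice_natCast]
    rw [List.drop_take]
  rw [e1, e2]
  simp only [Bool.and_eq_true, beq_iff_eq]
  constructor
  · rintro ⟨h1, h2⟩
    exact ⟨(pvSfx_iff_drop hjp hpm).mp h2, h1⟩
  · rintro ⟨h1, h2⟩
    exact ⟨h2, (pvSfx_iff_drop hjp hpm).mpr h1⟩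

-- descending Python range: find? = none when Q fails everywhere on (0, top]
theorem pv_find_desc_none (Q : Int → Bool) :
    ∀ tn : Nat, (∀ x : Int, 0 < x → x ≤ (tn : Int) → Q x = false) →
      (PySem.List.pyRange (tn : Int) 0 (-1)).find? Q = none := by
  intro tn
  induction tn with
  | zero =>
    intro _
    rw [PySem.List.pyRange_neg_one_eq_nil (by omega)]
    rfl
  | succ n ihn =>
    intro h
    rw [PySem.List.pyRange_neg_one_cons (by omega)]
    rw [List.find?_cons]
    rw [h ((n + 1 : Nat) : Int) (by push_cast; omega) le_rfl]
    have e : ((n + 1 : Nat) : Int) - 1 = (n : Int) := by push_cast; ring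
    rw [e]
    exact ihn (fun x hx hxle => h x hx (by push_cast; omega))

-- descending Python range: find? = the greatest hit
theorem pv_find_desc_some (Q : Int → Bool) (r : Nat) (hQ : Q ((r : Int) + 1) = true) :
    ∀ tn : Nat, (∀ x : Int, (r : Int) + 1 < x → x ≤ (tn : Int) → Q x = false) →
      r + 1 ≤ tn → (PySem.List.pyRange (tn : Int) 0 (-1)).find? Q = some ((r : Int) + 1) := by
  intro tn
  induction tn with
  | zero => intro _ h; omega
  | succ n ihn =>
    intro h hle
    rw [PySem.List.pyRange_neg_one_cons (by push_cast; omega)]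
    rw [List.find?_cons]
    by_cases he : r + 1 = n + 1
    · have e : ((n + 1 : Nat) : Int) = (r : Int) + 1 := by push_cast; omega
      rw [e, hQ]
    · have hlt : r + 1 < n + 1 := by omega
      rw [h ((n + 1 : Nat) : Int) (by push_cast; omega) le_rfl]
      have e : ((n + 1 : Nat) : Int) - 1 = (n : Int) := by push_cast; ring
      rw [e]
      exact ihn (fun x hx hxle => h x hx (by push_cast; omega)) (by omega)

-- the chase in B starting from a nonnegative position, as an Int
theorem pv_alt_k_eq (pi : List Nat) (q : Nat → Bool) (pn : Nat) :
    (if 0 < ((pn : Nat) : Int) then ((pvChase pi q ((pn : Nat) : Int).toNat : Nat) : Int) else ((pn : Nat) : Int)) =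
      ((pvChase pi q pn : Nat) : Int) := by
  rw [Int.toNat_natCast]
  by_cases h : 0 < pn
  · rw [if_pos (by exact_mod_cast h)]
  · have : pn = 0 := by omega
    subst this
    rw [if_neg (by omega)]
    rw [pvChase]
    simp

-- ===== VERDICT =====
theorem get_next_position_spec : Claim_equal_get_next_position := by
  unfold Claim_equal_get_next_position
  intro needle p char _ hpre
  unfold Spec_get_next_position
  unfold Pre_get_next_position at hpre
  obtain ⟨hl, hr⟩ := hpre
  set s := needle.toList with hs
  set cl := char.toList with hcl
  by_cases hneg : p < 0
  · -- negative position: A's loop range is empty, B's while loop does not run;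
    -- both reduce to the same character test
    simp only [get_next_position, get_next_position_alt]
    rw [if_neg (by omega : ¬ 0 < p)]
    cases hfast : decide (p < (s.length : Int)) && pvA_charEq s cl p with
    | true => simp
    | false =>
      simp only [Bool.false_eq_true, if_false]
      rw [PySem.List.pyRange_neg_one_eq_nil (by omega : p ≤ (0 : Int))]
      simp
  · -- nonnegative position
    obtain ⟨pn, rfl⟩ := Int.eq_ofNat_of_zero_le (by omega : (0 : Int) ≤ p)
    have hpm : pn ≤ s.length := by exact_mod_cast hr
    set q : Nat → Bool := fun k => !(k == s.length) && pvCharEqN s cl k with hq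
    set pi := pvPrefixFn s with hpi
    obtain ⟨sp1, sp2, sp3, sp4⟩ := pvChase_spec pi q s pn hpm
      (fun i hi => pvPrefixFn_ok s i (lt_of_lt_of_le hi hpm))
    set r := pvChase pi q pn with hrdef
    have hBval : get_next_position_alt needle ((pn : Nat) : Int) char =
        (if decide ((r : Int) < (s.length : Int)) && pvCharEqN s cl r then (r : Int) + 1 else 0) := by
      simp only [get_next_position_alt, ← hs, ← hcl, ← hpi, ← hq]
      rw [pv_alt_k_eq, ← hrdef, pv_charEq_nat]
    by_cases hfast : pn < s.length ∧ pvCharEqN s cl pn = true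
    · -- A's fast path fires; B's chase stops immediately at pn
      have hrp : r = pn := by
        by_cases h0 : pn = 0
        · subst h0; rw [hrdef, pvChase]; simp
        · rw [hrdef, pvChase, if_neg h0, if_pos]
          rw [hq]
          simp only [Bool.and_eq_true, Bool.not_eq_true']
          exact ⟨by simp; omega, hfast.2⟩
      simp only [get_next_position, ← hs, ← hcl]
      rw [if_pos]
      · rw [hBval, hrp, if_pos]
        simp only [Bool.and_eq_true, decide_eq_true_eq]
        exact ⟨by exact_mod_cast hfast.1, hfast.2⟩
      · simp only [Bool.and_eq_true, decide_eq_true_eq]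
        refine ⟨by exact_mod_cast hfast.1, ?_⟩
        rw [pv_charEq_nat]; exact hfast.2
    · -- no fast path: A scans downward; the chase finds the greatest candidate
      have hAfast : (decide (((pn : Nat) : Int) < (s.length : Int)) && pvA_charEq s cl ((pn : Nat) : Int)) = false := by
        rw [pv_charEq_nat]
        by_cases h1 : pn < s.length
        · have h2 : pvCharEqN s cl pn = false := by
            cases h : pvCharEqN s cl pn
            · rfl
            · exact absurd ⟨h1, h⟩ hfast
          rw [h2]; simp
        · have : ¬ (((pn : Nat) : Int) < (s.length : Int)) := by
            push_cast; omega
          simp [this]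
      simp only [get_next_position, ← hs, ← hcl]
      rw [hAfast]
      simp only [Bool.false_eq_true, if_false]
      have hqpn : q pn = false := by
        rw [hq]
        by_cases h1 : pn < s.length
        · have h2 : pvCharEqN s cl pn = false := by
            cases h : pvCharEqN s cl pn
            · rfl
            · exact absurd ⟨h1, h⟩ hfast
          simp [h2]
        · have : pn = s.length := by omega
          simp [this]
      -- candidates of A's scan are exactly the chase-good indices
      have hgood : ∀ x : Int, 0 < x → x ≤ ((pn : Nat) : Int) →
          pvA_cond s ((pn : Nat) : Int) cl x = true →
          ∃ j : Nat, x = (j : Int) + 1 ∧ pvSfx s j pn ∧ q j = true := by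
        intro x hx0 hxp hcond
        obtain ⟨j, rfl⟩ : ∃ j : Nat, x = (j : Int) + 1 :=
          ⟨(x - 1).toNat, by omega⟩
        have hjp : j ≤ pn - 1 := by omega
        have hjm : j < s.length := by omega
        obtain ⟨h1, h2⟩ := (pv_cond_bridge s cl pn j hpm (by omega) hjm).mp hcond
        refine ⟨j, rfl, h1, ?_⟩
        rw [hq]
        simp only [Bool.and_eq_true, Bool.not_eq_true']
        exact ⟨by simp; omega, h2⟩
      by_cases hres : r < s.length ∧ pvCharEqN s cl r = true
      · -- B returns r+1; A's descending scan first hits r+1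
        have hqr : q r = true := by
          rw [hq]
          simp only [Bool.and_eq_true, Bool.not_eq_true']
          exact ⟨by simp; omega, hres.2⟩
        have hrpn : r < pn := by
          rcases Nat.lt_or_ge r pn with h | h
          · exact h
          · exfalso
            have : r = pn := by omega
            rw [this] at hqr
            rw [hqpn] at hqr
            exact absurd hqr (by simp)
        have hQr : pvA_cond s ((pn : Nat) : Int) cl ((r : Int) + 1) = true := by
          apply (pv_cond_bridge s cl pn r hpm (by omega) hres.1).mpr
          exact ⟨sp2, hres.2⟩
        have hfind := pv_find_desc_some (pvA_cond s ((pn : Nat) : Int) cl) r hQr pn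
          (fun x hx hxle => by
            cases hcond : pvA_cond s ((pn : Nat) : Int) cl x
            · rfl
            · exfalso
              obtain ⟨j, rfl, hj1, hj2⟩ := hgood x (by omega) hxle hcond
              obtain ⟨hjr, _⟩ := sp4 j hj1 hj2
              omega)
          (by omega)
        rw [hfind, hBval, if_pos]
        simp only [Bool.and_eq_true, decide_eq_true_eq]
        exact ⟨by exact_mod_cast hres.1, hres.2⟩
      · -- B returns 0; A's descending scan finds nothing
        have hfind := pv_find_desc_none (pvA_cond s ((pn : Nat) : Int) cl) pn
          (fun x hx hxle => by
            cases hcond : pvA_cond s ((pn : Nat) : Int) cl x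
            · rfl
            · exfalso
              obtain ⟨j, rfl, hj1, hj2⟩ := hgood x hx hxle hcond
              obtain ⟨_, hqr⟩ := sp4 j hj1 hj2
              rw [hq] at hqr
              simp only [Bool.and_eq_true, Bool.not_eq_true'] at hqr
              apply hres
              refine ⟨?_, hqr.2⟩
              have : r ≠ s.length := by simpa using hqr.1
              omega)
        rw [hfind, hBval, if_neg]
        intro hcontr
        simp only [Bool.and_eq_true, decide_eq_true_eq] at hcontr
        exact hres ⟨by exact_mod_cast hcontr.1, hcontr.2⟩
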